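-- pv_equiv track=rewrite | github.com/tb991/Texas-Hold-em-Poker-Card-Evaluation | cards.py | isPairOrMore
-- ===== SOURCE A (Python) =====
-- def isPairOrMore(sc):
-- 	out = False
-- 	for c in sc:
-- 		for c2 in sc:
-- 			if c == c2:
-- 				pass
-- 			else:
-- 				if c[0] == c2[0]:
-- 					out = True
-- 	return out
-- ===== SOURCE B (Python) =====
-- def isPairOrMore(sc):
--     groups = {}
--     for c in sc:
--         groups.setdefault(c[0], set()).add(c)
--     return any(len(g) >= 2 for g in groups.values())
-- ===== Notes on version B (the rewrite author's own statement) =====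
-- stated objective: faster
-- what changed: Replaces the quadratic nested pairwise scan with a single pass building a rank-indexed dict of sets of distinct card values, then a scan over the groups for one of size >= 2 (identical duplicate cards still collapse, as in A).
-- outside the precondition, e.g. on isPairOrMore(['', '']): A returns False, B raises IndexError
import Mathlib
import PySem

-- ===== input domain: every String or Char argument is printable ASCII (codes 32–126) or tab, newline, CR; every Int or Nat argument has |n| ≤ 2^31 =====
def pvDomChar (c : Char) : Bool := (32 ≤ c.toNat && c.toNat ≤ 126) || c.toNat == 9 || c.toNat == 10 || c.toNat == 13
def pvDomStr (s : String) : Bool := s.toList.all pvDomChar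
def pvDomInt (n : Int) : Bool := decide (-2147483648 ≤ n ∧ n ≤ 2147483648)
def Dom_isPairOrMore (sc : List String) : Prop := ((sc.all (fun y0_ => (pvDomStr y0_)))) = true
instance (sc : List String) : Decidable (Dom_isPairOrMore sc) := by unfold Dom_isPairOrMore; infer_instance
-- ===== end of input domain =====

-- B replaces A's nested pairwise scan by one pass grouping the distinct card values per rank
-- (first character), then a scan over the groups for one of size >= 2 (objective: alternative).

-- ===== PORT A =====
-- c[0] is ported as PySem.Str.pyGet? c 0 (none exactly where Python raises IndexError; Pre_ excludes that).
def isPairOrMore (sc : List String) : Bool :=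
  sc.foldl (fun out c =>
    sc.foldl (fun out c2 =>
      if c == c2 then out
      else if PySem.Str.pyGet? c 0 == PySem.Str.pyGet? c2 0 then true else out) out) false

-- ===== PORT B =====
-- groups.setdefault(c[0], set()).add(c) is Dict.modify (c[0]) ∅ (add · c): d[k] = f(d.get(k, dflt)).
def isPairOrMore_alt (sc : List String) : Bool :=
  let groups : PySem.Dict (Option Char) (PySem.Set String) :=
    sc.foldl (fun d c => d.modify (PySem.Str.pyGet? c 0) PySem.Set.empty (fun g => PySem.Set.add g c))
      PySem.Dict.empty
  groups.values.any (fun g => decide (2 ≤ g.length))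

-- ===== PRECONDITION & SPEC =====
-- Pre_ excludes lists containing the empty string "": there A either raises IndexError on c[0]
-- (whenever a distinct second element exists) or returns False only because every pair is skipped
-- by the c == c2 branch, while B's c[0] raises IndexError on any list containing "".
def Pre_isPairOrMore (sc : List String) : Prop := ∀ s ∈ sc, s ≠ ""
instance (sc : List String) : Decidable (Pre_isPairOrMore sc) := by unfold Pre_isPairOrMore; infer_instance
def pvWitness_isPairOrMore : List String := ["As", "Ah", "7d"]

def Spec_isPairOrMore (sc : List String) (out : Bool) : Prop := out = isPairOrMore_alt sc
instance (sc : List String) (out : Bool) : Decidable (Spec_isPairOrMore sc out) := by unfold Spec_isPairOrMore; infer_instance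

-- ===== CLAIM (what is proved, stated in full; the proofs are below) =====
def Claim_equal_isPairOrMore : Prop := ∀ (sc : List String), Dom_isPairOrMore sc → Pre_isPairOrMore sc → Spec_isPairOrMore sc (isPairOrMore sc)

-- ===== LEMMAS AND PROOFS =====

-- the rank of a card (Python c[0])
def pvKey (c : String) : Option Char := PySem.Str.pyGet? c 0

-- the grouping step of B's loop
def pvStep (d : PySem.Dict (Option Char) (PySem.Set String)) (c : String) :
    PySem.Dict (Option Char) (PySem.Set String) :=
  d.modify (pvKey c) PySem.Set.empty (fun g => PySem.Set.add g c)

-- A's nested fold is the pairwise 'any'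
theorem A_eq_any (sc : List String) :
    isPairOrMore sc = sc.any (fun c => sc.any (fun c2 => !(c == c2) && (pvKey c == pvKey c2))) := by
  unfold isPairOrMore
  have inner : ∀ (c : String) (b : Bool),
      sc.foldl (fun out c2 =>
        if c == c2 then out
        else if PySem.Str.pyGet? c 0 == PySem.Str.pyGet? c2 0 then true else out) b
      = (b || sc.any (fun c2 => !(c == c2) && (pvKey c == pvKey c2))) := by
    intro c b
    rw [show (fun out c2 =>
        if c == c2 then out
        else if PySem.Str.pyGet? c 0 == PySem.Str.pyGet? c2 0 then true else out)
      = (fun out c2 => if (!(c == c2) && (pvKey c == pvKey c2)) = true then true else out) from ?_]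
    · exact PySem.List.foldl_if_true_eq _ _ _
    · funext out c2
      by_cases h : c == c2 <;> simp [h, pvKey]
  calc sc.foldl (fun out c =>
      sc.foldl (fun out c2 =>
        if c == c2 then out
        else if PySem.Str.pyGet? c 0 == PySem.Str.pyGet? c2 0 then true else out) out) false
      = sc.foldl (fun out c => if (sc.any (fun c2 => !(c == c2) && (pvKey c == pvKey c2))) = true then true else out) false := by
        apply PySem.List.foldl_congr_mem; intro acc x _
        rw [inner]; cases h : sc.any (fun c2 => !(x == c2) && (pvKey x == pvKey c2)) <;> simp [h]
    _ = _ := by rw [PySem.List.foldl_if_true_eq]; simp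

-- invariant of B's grouping loop: the group at key k collects the matching cards
theorem getD_fold (l : List String) (d : PySem.Dict (Option Char) (PySem.Set String)) (k : Option Char) :
    (l.foldl pvStep d).getD k PySem.Set.empty
      = PySem.Set.update (d.getD k PySem.Set.empty) (l.filter (fun c => pvKey c == k)) := by
  induction l generalizing d with
  | nil => simp [PySem.Set.update]
  | cons c t ih =>
    simp only [List.foldl_cons, List.filter_cons, ih]
    by_cases h : pvKey c = k
    · simp [pvStep, h, PySem.Dict.getD_modify_self, PySem.Set.update]
    · have hne : ¬ (pvKey c == k) = true := by simpa using h
      simp [pvStep, PySem.Dict.getD_modify, Ne.symm h, hne]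

theorem keys_fold (sc : List String) :
    (sc.foldl pvStep PySem.Dict.empty).keys = PySem.Set.ofList (sc.map pvKey) := by
  have := PySem.Dict.keys_foldl_modify_key (l := sc) (key := pvKey)
    (d0 := PySem.Set.empty) (f := fun _ c => fun g => PySem.Set.add g c) (d := PySem.Dict.empty)
  simpa [pvStep, PySem.Set.update, PySem.Set.ofList] using this

theorem nodup_keys_fold (sc : List String) :
    (sc.foldl pvStep PySem.Dict.empty).keys.Nodup :=
  PySem.Dict.nodup_keys_foldl_modify_key sc pvKey PySem.Set.empty
    (fun _ c => fun g => PySem.Set.add g c) PySem.Dict.empty (by simp)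

-- B's value scan over the groups, expressed over the keys
theorem B_eq_any (sc : List String) :
    isPairOrMore_alt sc
    = (PySem.Set.ofList (sc.map pvKey)).any
        (fun k => decide (2 ≤ (PySem.Set.ofList (sc.filter (fun c => pvKey c == k))).length)) := by
  show (sc.foldl pvStep PySem.Dict.empty).values.any (fun g => decide (2 ≤ g.length)) = _
  rw [PySem.Dict.values_eq_map_keys _ (nodup_keys_fold sc) PySem.Set.empty, List.any_map, keys_fold]
  apply PySem.List.any_congr_mem
  intro k _
  rw [Function.comp_apply, getD_fold]
  simp [PySem.Set.update, PySem.Set.ofList, PySem.Dict.getD_empty]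

theorem nodup_two_iff {α : Type} (l : List α) (h : l.Nodup) :
    2 ≤ l.length ↔ ∃ a ∈ l, ∃ b ∈ l, a ≠ b := by
  constructor
  · intro hl
    match l, h with
    | a :: b :: t, h =>
      refine ⟨a, by simp, b, by simp, ?_⟩
      intro hab; subst hab; simp at h
  · rintro ⟨a, ha, b, hb, hab⟩
    match l with
    | [] => simp at ha
    | [x] => simp at ha hb; subst ha; subst hb; exact absurd rfl hab
    | x :: y :: t => simp [List.length]

-- a dedup'd list has at least two elements iff the source has two distinct ones
theorem ofList_two_iff {α : Type} [BEq α] [LawfulBEq α] (xs : List α) :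
    2 ≤ (PySem.Set.ofList xs).length ↔ ∃ a ∈ xs, ∃ b ∈ xs, a ≠ b := by
  rw [nodup_two_iff _ (PySem.Set.nodup_ofList xs)]
  simp [PySem.Set.mem_ofList]

-- both sides state 'two distinct cards share a rank'
theorem any_eq_grouped (sc : List String) :
    (sc.any (fun c => sc.any (fun c2 => !(c == c2) && (pvKey c == pvKey c2))))
    = (PySem.Set.ofList (sc.map pvKey)).any
        (fun k => decide (2 ≤ (PySem.Set.ofList (sc.filter (fun c => pvKey c == k))).length)) := by
  rw [Bool.eq_iff_iff]
  simp only [List.any_eq_true, PySem.Set.mem_ofList, List.mem_map, List.mem_filter,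
    Bool.and_eq_true, Bool.not_eq_eq_eq_not, Bool.not_true, beq_eq_false_iff_ne, beq_iff_eq,
    decide_eq_true_eq, ofList_two_iff]
  constructor
  · rintro ⟨c, hc, c2, hc2, hne, hk⟩
    exact ⟨pvKey c, ⟨c, hc, rfl⟩, c, ⟨hc, rfl⟩, c2, ⟨hc2, hk.symm⟩, hne⟩
  · rintro ⟨k, _, a, ⟨ha, hak⟩, b, ⟨hb, hbk⟩, hab⟩
    exact ⟨a, ha, b, hb, hab, by rw [hak, hbk]⟩

-- ===== VERDICT (by name: the statement is the Claim_ definition above) =====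
theorem isPairOrMore_spec : Claim_equal_isPairOrMore := by
  intro sc _ _
  show isPairOrMore sc = isPairOrMore_alt sc
  rw [A_eq_any, B_eq_any, any_eq_grouped]
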